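-- pv_equiv track=rewrite | github.com/hksawczuk/grahamtools | examples/fork_degree_split.py | classify_tree
-- ===== SOURCE A (Python) =====
-- from collections import defaultdict
--
-- def classify_tree(bs, e1):
--     edges = [e1[i] for i in bs]
--     verts = set()
--     for u, v in edges: verts.add(u); verts.add(v)
--     ne, nv = len(edges), len(verts)
--     if ne != nv - 1: return None
--     adj = defaultdict(set)
--     for u, v in edges: adj[u].add(v); adj[v].add(u)
--     visited = set()
--     stack = [next(iter(verts))]
--     while stack:
--         v = stack.pop()
--         if v in visited: continue
--         visited.add(v)
--         for u in adj[v]: stack.append(u)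
--     if visited != verts: return None
--     deg = defaultdict(int)
--     for u, v in edges: deg[u] += 1; deg[v] += 1
--     deg_seq = tuple(sorted(deg.values()))
--     if deg_seq == (1, 1, 1, 2, 3): return "fork"
--     if deg_seq == (1, 1, 1, 1, 4): return "K_{1,4}"
--     if deg_seq == (1, 1, 2, 2, 2): return "P_5"
--     return f"tree_{deg_seq}"
-- ===== SOURCE B (Python) =====
-- def classify_tree(bs, e1):
--     edges = [e1[i] for i in bs]
--     verts = set()
--     for u, v in edges:
--         verts.add(u); verts.add(v)
--     if len(edges) != len(verts) - 1:
--         return None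
--     # connectivity by eager label merging (union-find with immediate full relabel)
--     comp = {w: w for w in verts}
--     for u, v in edges:
--         lu, lv = comp[u], comp[v]
--         if lu != lv:
--             comp = {w: (lu if l == lv else l) for w, l in comp.items()}
--     if len(set(comp.values())) != 1:
--         return None
--     deg = {}
--     for e in edges:
--         for w in e:
--             deg[w] = deg.get(w, 0) + 1
--     deg_seq = tuple(sorted(deg.values()))
--     table = {(1, 1, 1, 2, 3): "fork", (1, 1, 1, 1, 4): "K_{1,4}", (1, 1, 2, 2, 2): "P_5"}
--     return table.get(deg_seq, f"tree_{deg_seq}")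
-- ===== Notes on version B (the rewrite author's own statement) =====
-- stated objective: alternative
-- what changed: The DFS-with-explicit-stack connectivity check is replaced by union-find-style eager label merging (every vertex starts as its own component label; each edge merges two labels; connected iff one distinct label remains), and the if-chain classification becomes a table lookup with an f-string fallback.
import Mathlib
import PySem

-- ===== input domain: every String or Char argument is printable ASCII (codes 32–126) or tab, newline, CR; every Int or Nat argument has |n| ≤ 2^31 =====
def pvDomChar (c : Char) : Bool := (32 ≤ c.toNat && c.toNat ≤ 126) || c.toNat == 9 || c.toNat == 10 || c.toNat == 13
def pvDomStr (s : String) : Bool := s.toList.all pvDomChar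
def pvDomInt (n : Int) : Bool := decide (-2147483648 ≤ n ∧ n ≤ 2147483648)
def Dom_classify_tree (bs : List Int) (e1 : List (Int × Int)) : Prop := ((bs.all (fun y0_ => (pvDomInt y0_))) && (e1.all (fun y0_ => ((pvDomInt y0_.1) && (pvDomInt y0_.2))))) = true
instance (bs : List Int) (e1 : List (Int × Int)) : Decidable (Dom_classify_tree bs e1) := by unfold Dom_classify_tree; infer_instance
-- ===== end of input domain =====

-- B replaces A's explicit-stack DFS connectivity check by union-find-style eager label merging and
-- the if-chain classification by a table lookup (objective: alternative algorithm, same result).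
-- A's Python DFS consumes Python's set iteration order (start vertex, push order); the connectivity
-- verdict is independent of that order, so the port fixes a deterministic order and remains exact.

-- ===== PORT A =====
-- shared formatting helper: Python's repr of a tuple of ints, as used by f"tree_{deg_seq}" in both Pythons
def pyTupleRepr (xs : List Int) : String :=
  match xs with
  | [] => "()"
  | [x] => "(" ++ PySem.Int.toStr x ++ ",)"
  | _ => "(" ++ PySem.Str.join ", " (xs.map PySem.Int.toStr) ++ ")"

-- the while-loop of A's DFS; the fuel passed below (1 + nv*(nv+1)) provably bounds the number of
-- loop iterations, so the fueled recursion computes exactly what Python's unbounded loop computes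
def dfsA (adj : PySem.Dict Int (PySem.Set Int)) : Nat → List Int → PySem.Set Int → PySem.Set Int
  | 0, _, visited => visited
  | _ + 1, [], visited => visited
  | fuel + 1, v :: rest, visited =>
      if PySem.Set.contains visited v then dfsA adj fuel rest visited
      else dfsA adj fuel ((adj.getD v PySem.Set.empty) ++ rest) (PySem.Set.add visited v)

-- A's body after 'edges = [e1[i] for i in bs]'
def classifyA (edges : List (Int × Int)) : Option String :=
  let verts : PySem.Set Int := edges.foldl (fun s p => PySem.Set.add (PySem.Set.add s p.1) p.2) PySem.Set.empty
  if (edges.length : Int) ≠ (verts.length : Int) - 1 then none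
  else
    let adj : PySem.Dict Int (PySem.Set Int) := edges.foldl (fun d p =>
        let d1 := d.insert p.1 (PySem.Set.add (d.getD p.1 PySem.Set.empty) p.2)
        d1.insert p.2 (PySem.Set.add (d1.getD p.2 PySem.Set.empty) p.1)) PySem.Dict.empty
    let visited := dfsA adj (1 + verts.length * (verts.length + 1)) [verts.headD 0] PySem.Set.empty
    if ¬ (PySem.Set.equal visited verts = true) then none
    else
      let deg : PySem.Dict Int Int := edges.foldl (fun d p =>
          let d1 := d.insert p.1 (d.getD p.1 0 + 1)
          d1.insert p.2 (d1.getD p.2 0 + 1)) PySem.Dict.empty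
      let deg_seq := PySem.List.sorted deg.values (fun x => x) false
      if deg_seq = [1, 1, 1, 2, 3] then some "fork"
      else if deg_seq = [1, 1, 1, 1, 4] then some "K_{1,4}"
      else if deg_seq = [1, 1, 2, 2, 2] then some "P_5"
      else some ("tree_" ++ pyTupleRepr deg_seq)

def classify_tree (bs : List Int) (e1 : List (Int × Int)) : Option String :=
  classifyA (bs.map (fun i => PySem.List.pyGetD e1 i (0, 0)))

-- ===== PORT B =====
-- one edge of the label-merging loop: if the endpoints' labels differ, relabel lv-labelled vertices to lu
def relabelStep (comp : PySem.Dict Int Int) (p : Int × Int) : PySem.Dict Int Int :=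
  let lu := comp.getD p.1 0
  let lv := comp.getD p.2 0
  if lu ≠ lv then PySem.Dict.mk (comp.items.map (fun q => (q.1, if q.2 = lv then lu else q.2))) else comp

-- B's body after 'edges = [e1[i] for i in bs]'
def classifyB (edges : List (Int × Int)) : Option String :=
  let verts : PySem.Set Int := edges.foldl (fun s p => PySem.Set.add (PySem.Set.add s p.1) p.2) PySem.Set.empty
  if (edges.length : Int) ≠ (verts.length : Int) - 1 then none
  else
    let comp0 : PySem.Dict Int Int := verts.foldl (fun d w => d.insert w w) PySem.Dict.empty
    let comp := edges.foldl relabelStep comp0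
    if (PySem.Set.ofList comp.values).length ≠ 1 then none
    else
      let deg : PySem.Dict Int Int := edges.foldl (fun d p =>
          [p.1, p.2].foldl (fun d2 w => d2.insert w (d2.getD w 0 + 1)) d) PySem.Dict.empty
      let deg_seq := PySem.List.sorted deg.values (fun x => x) false
      let table : PySem.Dict (List Int) String :=
        PySem.Dict.ofList [([1, 1, 1, 2, 3], "fork"), ([1, 1, 1, 1, 4], "K_{1,4}"), ([1, 1, 2, 2, 2], "P_5")]
      some (table.getD deg_seq ("tree_" ++ pyTupleRepr deg_seq))

def classify_tree_alt (bs : List Int) (e1 : List (Int × Int)) : Option String :=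
  classifyB (bs.map (fun i => PySem.List.pyGetD e1 i (0, 0)))

-- ===== PRECONDITION & SPEC =====
-- Pre_ excludes exactly the inputs where some index in bs is out of range for e1 (Python IndexError).
def Pre_classify_tree (bs : List Int) (e1 : List (Int × Int)) : Prop :=
  ∀ i ∈ bs, PySem.Raise.InRange e1.length i
instance (bs : List Int) (e1 : List (Int × Int)) : Decidable (Pre_classify_tree bs e1) := by
  unfold Pre_classify_tree; infer_instance

def pvWitness_classify_tree : List Int × (List (Int × Int)) := ([0, 1, 2, 3], [(1, 2), (2, 3), (3, 4), (4, 5)])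

def Spec_classify_tree (bs : List Int) (e1 : List (Int × Int)) (out : Option String) : Prop := out = classify_tree_alt bs e1
instance (bs : List Int) (e1 : List (Int × Int)) (out : Option String) : Decidable (Spec_classify_tree bs e1 out) := by unfold Spec_classify_tree; infer_instance

-- ===== CLAIM (what is proved, stated in full; the proofs are below) =====
def Claim_equal_classify_tree : Prop := ∀ (bs : List Int) (e1 : List (Int × Int)), Dom_classify_tree bs e1 → Pre_classify_tree bs e1 → Spec_classify_tree bs e1 (classify_tree bs e1)

-- ===== LEMMAS AND PROOFS =====

-- undirected adjacency and connectivity generated by an edge list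
def EAdj (es : List (Int × Int)) (a b : Int) : Prop := (a, b) ∈ es ∨ (b, a) ∈ es
def Conn (es : List (Int × Int)) : Int → Int → Prop := Relation.ReflTransGen (EAdj es)

def vertsOf (es : List (Int × Int)) : PySem.Set Int :=
  es.foldl (fun s p => PySem.Set.add (PySem.Set.add s p.1) p.2) PySem.Set.empty

def adjOf (es : List (Int × Int)) : PySem.Dict Int (PySem.Set Int) :=
  es.foldl (fun d p =>
    let d1 := d.insert p.1 (PySem.Set.add (d.getD p.1 PySem.Set.empty) p.2)
    d1.insert p.2 (PySem.Set.add (d1.getD p.2 PySem.Set.empty) p.1)) PySem.Dict.empty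

theorem EAdj_symm (es : List (Int × Int)) : Symmetric (EAdj es) := by
  intro a b h; unfold EAdj at *; tauto

theorem Conn_symm (es : List (Int × Int)) {a b : Int} (h : Conn es a b) : Conn es b a :=
  Relation.ReflTransGen.symmetric (EAdj_symm es) h

theorem mem_vertsOf (es : List (Int × Int)) (x : Int) :
    x ∈ vertsOf es ↔ ∃ p ∈ es, p.1 = x ∨ p.2 = x := by
  have aux : ∀ (l : List (Int × Int)) (s : PySem.Set Int) (x : Int),
      x ∈ l.foldl (fun s p => PySem.Set.add (PySem.Set.add s p.1) p.2) s ↔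
        x ∈ s ∨ ∃ p ∈ l, p.1 = x ∨ p.2 = x := by
    intro l
    induction l with
    | nil => intro s x; simp
    | cons e t ih =>
      intro s x
      simp only [List.foldl_cons]
      rw [ih]
      constructor
      · rintro (h | ⟨p, hp, hx⟩)
        · rcases (PySem.Set.mem_add _ _ _).mp h with h' | rfl
          · rcases (PySem.Set.mem_add _ _ _).mp h' with h'' | rfl
            · exact Or.inl h''
            · exact Or.inr ⟨e, List.mem_cons_self, Or.inl rfl⟩
          · exact Or.inr ⟨e, List.mem_cons_self, Or.inr rfl⟩
        · exact Or.inr ⟨p, List.mem_cons_of_mem _ hp, hx⟩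
      · rintro (h | ⟨p, hp, hx⟩)
        · exact Or.inl ((PySem.Set.mem_add _ _ _).mpr (Or.inl ((PySem.Set.mem_add _ _ _).mpr (Or.inl h))))
        · rcases List.mem_cons.mp hp with rfl | hp'
          · rcases hx with h1 | h2
            · exact Or.inl ((PySem.Set.mem_add _ _ _).mpr (Or.inl ((PySem.Set.mem_add _ _ _).mpr (Or.inr h1.symm))))
            · exact Or.inl ((PySem.Set.mem_add _ _ _).mpr (Or.inr h2.symm))
          · exact Or.inr ⟨p, hp', hx⟩
  simpa using aux es PySem.Set.empty x

theorem nodup_vertsOf (es : List (Int × Int)) : (vertsOf es).Nodup := by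
  have aux : ∀ (l : List (Int × Int)) (s : PySem.Set Int), s.Nodup →
      (l.foldl (fun s p => PySem.Set.add (PySem.Set.add s p.1) p.2) s).Nodup := by
    intro l
    induction l with
    | nil => intro s hs; simpa using hs
    | cons e t ih =>
      intro s hs
      simp only [List.foldl_cons]
      exact ih _ (PySem.Set.nodup_add _ _ (PySem.Set.nodup_add _ _ hs))
  exact aux es PySem.Set.empty (by simp [PySem.Set.empty])

theorem mem_adjOf (es : List (Int × Int)) (x y : Int) :
    y ∈ (adjOf es).getD x PySem.Set.empty ↔ EAdj es x y := by
  have aux : ∀ (l : List (Int × Int)) (d : PySem.Dict Int (PySem.Set Int)) (x y : Int),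
      y ∈ (l.foldl (fun d p =>
        let d1 := d.insert p.1 (PySem.Set.add (d.getD p.1 PySem.Set.empty) p.2)
        d1.insert p.2 (PySem.Set.add (d1.getD p.2 PySem.Set.empty) p.1)) d).getD x PySem.Set.empty ↔
      y ∈ d.getD x PySem.Set.empty ∨ EAdj l x y := by
    intro l
    induction l with
    | nil => intro d x y; simp [EAdj]
    | cons e t ih =>
      intro d x y
      simp only [List.foldl_cons]
      rw [ih]
      have hsplit : EAdj (e :: t) x y ↔ ((x = e.1 ∧ y = e.2) ∨ (x = e.2 ∧ y = e.1)) ∨ EAdj t x y := by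
        unfold EAdj
        simp [List.mem_cons, Prod.ext_iff]
        tauto
      rw [hsplit]
      have hgd : ∀ z : Int,
          ((d.insert e.1 (PySem.Set.add (d.getD e.1 PySem.Set.empty) e.2)).insert e.2
            (PySem.Set.add ((d.insert e.1 (PySem.Set.add (d.getD e.1 PySem.Set.empty) e.2)).getD e.2 PySem.Set.empty) e.1)).getD z PySem.Set.empty =
          if z = e.2 then PySem.Set.add ((if e.2 = e.1 then PySem.Set.add (d.getD e.1 PySem.Set.empty) e.2 else d.getD e.2 PySem.Set.empty)) e.1
          else if z = e.1 then PySem.Set.add (d.getD e.1 PySem.Set.empty) e.2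
          else d.getD z PySem.Set.empty := by
        intro z
        rw [PySem.Dict.getD_insert]
        by_cases hz2 : z = e.2
        · simp [hz2, PySem.Dict.getD_insert]
        · simp [hz2, PySem.Dict.getD_insert]
      rw [hgd x]
      clear ih
      by_cases h2 : x = e.2 <;> by_cases h1 : x = e.1 <;> by_cases h12 : e.2 = e.1 <;>
        simp_all [PySem.Set.mem_add, eq_comm] <;> tauto
  simpa [adjOf] using aux es PySem.Dict.empty x y

theorem nodup_adjOf (es : List (Int × Int)) (x : Int) :
    ((adjOf es).getD x PySem.Set.empty).Nodup := by
  have aux : ∀ (l : List (Int × Int)) (d : PySem.Dict Int (PySem.Set Int)),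
      (∀ z : Int, (d.getD z PySem.Set.empty).Nodup) →
      ∀ x : Int, ((l.foldl (fun d p =>
        let d1 := d.insert p.1 (PySem.Set.add (d.getD p.1 PySem.Set.empty) p.2)
        d1.insert p.2 (PySem.Set.add (d1.getD p.2 PySem.Set.empty) p.1)) d).getD x PySem.Set.empty).Nodup := by
    intro l
    induction l with
    | nil => intro d hd x; simpa using hd x
    | cons e t ih =>
      intro d hd x
      simp only [List.foldl_cons]
      apply ih
      intro z
      rw [PySem.Dict.getD_insert]
      split_ifs with hz2
      · apply PySem.Set.nodup_add _ _ ?_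
        rw [PySem.Dict.getD_insert]
        split_ifs with h21
        · exact PySem.Set.nodup_add _ _ (hd e.1)
        · exact hd e.2
      · rw [PySem.Dict.getD_insert]
        split_ifs with hz1
        · exact PySem.Set.nodup_add _ _ (hd e.1)
        · exact hd z
  exact aux es PySem.Dict.empty (by intro z; simp [PySem.Dict.getD_empty, PySem.Set.empty]) x

theorem Conn_mem (es : List (Int × Int)) {a b : Int} (h : Conn es a b) (ha : a ∈ vertsOf es) :
    b ∈ vertsOf es := by
  induction h with
  | refl => exact ha
  | tail h1 h2 ih =>
    rcases h2 with h | h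
    · exact (mem_vertsOf es _).mpr ⟨_, h, Or.inr rfl⟩
    · exact (mem_vertsOf es _).mpr ⟨_, h, Or.inl rfl⟩

theorem contains_add_ne (s : PySem.Set Int) (x v : Int) (hxv : x ≠ v) :
    PySem.Set.contains (PySem.Set.add s v) x = PySem.Set.contains s x := by
  by_cases hm : x ∈ s
  · rw [(PySem.Set.contains_iff _ _).mpr hm,
      (PySem.Set.contains_iff _ _).mpr ((PySem.Set.mem_add _ _ _).mpr (Or.inl hm))]
  · have h1 : PySem.Set.contains s x = false := by
      cases h : PySem.Set.contains s x
      · rfl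
      · exact absurd ((PySem.Set.contains_iff _ _).mp h) hm
    have h2 : PySem.Set.contains (PySem.Set.add s v) x = false := by
      cases h : PySem.Set.contains (PySem.Set.add s v) x
      · rfl
      · rcases (PySem.Set.mem_add _ _ _).mp ((PySem.Set.contains_iff _ _).mp h) with hh | hh
        · exact absurd hh hm
        · exact absurd hh hxv
    rw [h1, h2]

theorem nodup_subset_length_le (l1 l2 : List Int) (h : l1.Nodup) (hs : ∀ x ∈ l1, x ∈ l2) :
    l1.length ≤ l2.length := by
  classical
  calc l1.length = l1.toFinset.card := (List.toFinset_card_of_nodup h).symm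
  _ ≤ l2.toFinset.card := Finset.card_le_card (by intro x hx; simp at hx ⊢; exact hs x hx)
  _ ≤ l2.length := l2.toFinset_card_le

theorem adj_len_le (es : List (Int × Int)) (x : Int) :
    ((adjOf es).getD x PySem.Set.empty).length ≤ (vertsOf es).length := by
  apply nodup_subset_length_le _ _ (nodup_adjOf es x)
  intro y hy
  rcases (mem_adjOf es x y).mp hy with h | h
  · exact (mem_vertsOf es y).mpr ⟨_, h, Or.inr rfl⟩
  · exact (mem_vertsOf es y).mpr ⟨_, h, Or.inl rfl⟩

theorem headD_mem (l : List Int) (h : l ≠ []) : l.headD 0 ∈ l := by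
  cases l with
  | nil => exact absurd rfl h
  | cons a t => simp

-- number of yet-unvisited vertices
def unvis (verts : List Int) (visited : PySem.Set Int) : Nat :=
  (verts.filter (fun x => !(PySem.Set.contains visited x))).length

theorem unvis_add (verts : List Int) (visited : PySem.Set Int) (v : Int)
    (hv : v ∈ verts) (hnv : v ∉ visited) (hnd : verts.Nodup) :
    unvis verts (PySem.Set.add visited v) + 1 = unvis verts visited := by
  unfold unvis
  induction verts with
  | nil => cases hv
  | cons a t ih =>
    obtain ⟨hat, hndt⟩ := List.nodup_cons.mp hnd
    rcases List.mem_cons.mp hv with rfl | hvt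
    · have h1 : PySem.Set.contains (PySem.Set.add visited v) v = true :=
        (PySem.Set.contains_iff _ _).mpr ((PySem.Set.mem_add _ _ _).mpr (Or.inr rfl))
      have h0 : PySem.Set.contains visited v = false := by
        cases h : PySem.Set.contains visited v
        · rfl
        · exact absurd ((PySem.Set.contains_iff _ _).mp h) hnv
      have hrest : t.filter (fun x => !(PySem.Set.contains (PySem.Set.add visited v) x)) =
          t.filter (fun x => !(PySem.Set.contains visited x)) :=
        List.filter_congr (fun x hx => by
          rw [contains_add_ne _ _ _ (fun h => hat (by rw [← h]; exact hx))])
      have e1 : List.filter (fun x => !(PySem.Set.contains (PySem.Set.add visited v) x)) (v :: t) =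
          List.filter (fun x => !(PySem.Set.contains (PySem.Set.add visited v) x)) t := by
        rw [List.filter_cons, h1]; simp
      have e2 : List.filter (fun x => !(PySem.Set.contains visited x)) (v :: t) =
          v :: List.filter (fun x => !(PySem.Set.contains visited x)) t := by
        rw [List.filter_cons, h0]; simp
      rw [e1, e2, hrest]
      simp
    · have hav : a ≠ v := fun h => hat (h ▸ hvt)
      have hih := ih hvt hndt
      simp only [List.filter_cons, contains_add_ne _ _ _ hav]
      cases h : PySem.Set.contains visited a
      · simp only [Bool.not_false, if_pos] at *
        simp only [List.length_cons]
        omega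
      · simp only [Bool.not_true] at *
        simpa using hih

-- the DFS loop invariant: result contains visited and everything reachable from the stack, and no more
theorem dfs_main (es : List (Int × Int)) :
    ∀ (fuel : Nat) (stack : List Int) (visited : PySem.Set Int),
    stack.length + (unvis (vertsOf es) visited) * ((vertsOf es).length + 1) ≤ fuel →
    (∀ x ∈ stack, x ∈ vertsOf es) →
    (∀ x ∈ visited, ∀ y, EAdj es x y → y ∈ visited ∨ y ∈ stack) →
    (∀ x ∈ visited, x ∈ dfsA (adjOf es) fuel stack visited) ∧
    (∀ s ∈ stack, s ∈ dfsA (adjOf es) fuel stack visited) ∧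
    (∀ w ∈ dfsA (adjOf es) fuel stack visited, w ∈ visited ∨ ∃ s ∈ stack, Conn es s w) ∧
    (∀ x ∈ dfsA (adjOf es) fuel stack visited, ∀ y, EAdj es x y → y ∈ dfsA (adjOf es) fuel stack visited) := by
  intro fuel
  induction fuel with
  | zero =>
    intro stack visited hfuel hsv hgood
    have hs : stack = [] := by
      have h0 : stack.length = 0 := by omega
      exact List.length_eq_zero_iff.mp h0
    subst hs
    refine ⟨fun x hx => hx, by simp, fun w hw => Or.inl hw, ?_⟩
    intro x hx y hy
    rcases hgood x hx y hy with h | h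
    · exact h
    · simp at h
  | succ fuel ih =>
    intro stack visited hfuel hsv hgood
    cases stack with
    | nil =>
      refine ⟨fun x hx => hx, by simp, fun w hw => Or.inl hw, ?_⟩
      intro x hx y hy
      rcases hgood x hx y hy with h | h
      · exact h
      · simp at h
    | cons v rest =>
      by_cases hvv : PySem.Set.contains visited v = true
      · have hred : dfsA (adjOf es) (fuel+1) (v :: rest) visited = dfsA (adjOf es) fuel rest visited := by
          rw [show dfsA (adjOf es) (fuel+1) (v :: rest) visited =
              if PySem.Set.contains visited v then dfsA (adjOf es) fuel rest visited
              else dfsA (adjOf es) fuel (((adjOf es).getD v PySem.Set.empty) ++ rest)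
                (PySem.Set.add visited v) from rfl, if_pos hvv]
        have hv : v ∈ visited := (PySem.Set.contains_iff _ _).mp hvv
        obtain ⟨A1, A2, A3, A4⟩ := ih rest visited
          (by simp only [List.length_cons] at hfuel; omega)
          (fun x hx => hsv x (List.mem_cons_of_mem _ hx))
          (by
            intro x hx y hy
            rcases hgood x hx y hy with h | h
            · exact Or.inl h
            · rcases List.mem_cons.mp h with rfl | h2
              · exact Or.inl hv
              · exact Or.inr h2)
        rw [hred]
        refine ⟨A1, ?_, ?_, A4⟩
        · intro s hs
          rcases List.mem_cons.mp hs with rfl | h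
          · exact A1 _ hv
          · exact A2 _ h
        · intro w hw
          rcases A3 w hw with h | ⟨s, hs, hc⟩
          · exact Or.inl h
          · exact Or.inr ⟨s, List.mem_cons_of_mem _ hs, hc⟩
      · have hvv' : PySem.Set.contains visited v = false := by
          cases h : PySem.Set.contains visited v
          · rfl
          · exact absurd h hvv
        have hnvv : v ∉ visited := fun h => hvv ((PySem.Set.contains_iff _ _).mpr h)
        have hvverts : v ∈ vertsOf es := hsv v List.mem_cons_self
        have hred : dfsA (adjOf es) (fuel+1) (v :: rest) visited =
            dfsA (adjOf es) fuel (((adjOf es).getD v PySem.Set.empty) ++ rest) (PySem.Set.add visited v) := by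
          rw [show dfsA (adjOf es) (fuel+1) (v :: rest) visited =
              if PySem.Set.contains visited v then dfsA (adjOf es) fuel rest visited
              else dfsA (adjOf es) fuel (((adjOf es).getD v PySem.Set.empty) ++ rest)
                (PySem.Set.add visited v) from rfl, if_neg hvv]
        have hdeg : ((adjOf es).getD v PySem.Set.empty).length ≤ (vertsOf es).length := adj_len_le es v
        have huv : unvis (vertsOf es) (PySem.Set.add visited v) + 1 = unvis (vertsOf es) visited :=
          unvis_add _ _ _ hvverts hnvv (nodup_vertsOf es)
        obtain ⟨A1, A2, A3, A4⟩ := ih (((adjOf es).getD v PySem.Set.empty) ++ rest) (PySem.Set.add visited v)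
          (by
            rw [List.length_append]
            simp only [List.length_cons] at hfuel
            rw [← huv] at hfuel
            have hexp : (unvis (vertsOf es) (PySem.Set.add visited v) + 1) * ((vertsOf es).length + 1)
                = unvis (vertsOf es) (PySem.Set.add visited v) * ((vertsOf es).length + 1)
                  + (vertsOf es).length + 1 := by ring
            rw [hexp] at hfuel
            generalize unvis (vertsOf es) (PySem.Set.add visited v) * ((vertsOf es).length + 1) = k at hfuel ⊢
            omega)
          (by
            intro x hx
            rcases List.mem_append.mp hx with h | h
            · rcases (mem_adjOf es v x).mp h with h' | h'
              · exact (mem_vertsOf es x).mpr ⟨_, h', Or.inr rfl⟩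
              · exact (mem_vertsOf es x).mpr ⟨_, h', Or.inl rfl⟩
            · exact hsv x (List.mem_cons_of_mem _ h))
          (by
            intro x hx y hy
            rcases (PySem.Set.mem_add _ _ _).mp hx with hxx | rfl
            · rcases hgood x hxx y hy with h | h
              · exact Or.inl ((PySem.Set.mem_add _ _ _).mpr (Or.inl h))
              · rcases List.mem_cons.mp h with rfl | h2
                · exact Or.inl ((PySem.Set.mem_add _ _ _).mpr (Or.inr rfl))
                · exact Or.inr (List.mem_append_right _ h2)
            · exact Or.inr (List.mem_append_left _ ((mem_adjOf es x y).mpr hy)))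
        rw [hred]
        refine ⟨?_, ?_, ?_, A4⟩
        · intro x hx; exact A1 x ((PySem.Set.mem_add _ _ _).mpr (Or.inl hx))
        · intro s hs
          rcases List.mem_cons.mp hs with rfl | h
          · exact A1 s ((PySem.Set.mem_add _ _ _).mpr (Or.inr rfl))
          · exact A2 s (List.mem_append_right _ h)
        · intro w hw
          rcases A3 w hw with h | ⟨s, hs, hc⟩
          · rcases (PySem.Set.mem_add _ _ _).mp h with h' | rfl
            · exact Or.inl h'
            · exact Or.inr ⟨w, List.mem_cons_self, Relation.ReflTransGen.refl⟩
          · rcases List.mem_append.mp hs with h' | h'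
            · exact Or.inr ⟨v, List.mem_cons_self, Relation.ReflTransGen.head ((mem_adjOf es v s).mp h') hc⟩
            · exact Or.inr ⟨s, List.mem_cons_of_mem _ h', hc⟩

theorem dfs_mem (es : List (Int × Int)) (hne : vertsOf es ≠ []) (w : Int) :
    w ∈ dfsA (adjOf es) (1 + (vertsOf es).length * ((vertsOf es).length + 1))
        [(vertsOf es).headD 0] PySem.Set.empty ↔ Conn es ((vertsOf es).headD 0) w := by
  have hv0 : (vertsOf es).headD 0 ∈ vertsOf es := headD_mem _ hne
  have hunv : unvis (vertsOf es) PySem.Set.empty = (vertsOf es).length := by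
    unfold unvis
    rw [List.filter_eq_self.mpr]
    intro x hx
    simp [PySem.Set.contains]
  obtain ⟨A1, A2, A3, A4⟩ := dfs_main es (1 + (vertsOf es).length * ((vertsOf es).length + 1))
    [(vertsOf es).headD 0] PySem.Set.empty
    (by
      simp only [List.length_cons, List.length_nil, hunv]
      generalize List.length (vertsOf es) * (List.length (vertsOf es) + 1) = k
      omega)
    (by intro x hx; rcases List.mem_singleton.mp hx with rfl; exact hv0)
    (by intro x hx; simp [PySem.Set.empty] at hx)
  constructor
  · intro hw
    rcases A3 w hw with h | ⟨s, hs, hc⟩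
    · simp [PySem.Set.empty] at h
    · rcases List.mem_singleton.mp hs with rfl; exact hc
  · intro hc
    induction hc with
    | refl => exact A2 _ (List.mem_singleton.mpr rfl)
    | tail h1 h2 ih2 => exact A4 _ ih2 _ h2

-- A's connectivity verdict, characterised
theorem condA_iff (es : List (Int × Int)) (hne : vertsOf es ≠ []) :
    PySem.Set.equal
      (dfsA (adjOf es) (1 + (vertsOf es).length * ((vertsOf es).length + 1))
        [(vertsOf es).headD 0] PySem.Set.empty) (vertsOf es) = true ↔
    ∀ w ∈ vertsOf es, Conn es ((vertsOf es).headD 0) w := by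
  rw [PySem.Set.equal_iff]
  constructor
  · intro h w hw
    exact (dfs_mem es hne w).mp ((h w).mpr hw)
  · intro h x
    constructor
    · intro hx
      exact Conn_mem es ((dfs_mem es hne x).mp hx) (headD_mem _ hne)
    · intro hx
      exact (dfs_mem es hne x).mpr (h x hx)

-- ---- B side ----
def comp0Of (vs : List Int) : PySem.Dict Int Int := vs.foldl (fun d w => d.insert w w) PySem.Dict.empty

def degOf (es : List (Int × Int)) : PySem.Dict Int Int :=
  es.foldl (fun d p =>
    let d1 := d.insert p.1 (d.getD p.1 0 + 1)
    d1.insert p.2 (d1.getD p.2 0 + 1)) PySem.Dict.empty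

def degSeq (es : List (Int × Int)) : List Int :=
  PySem.List.sorted (degOf es).values (fun x => x) false

theorem getD_mk_map (g : Int → Int) (l : List (Int × Int)) (x : Int) :
    (PySem.Dict.mk (l.map (fun q => (q.1, g q.2)))).get? x = ((PySem.Dict.mk l).get? x).map g := by
  induction l with
  | nil => simp [PySem.Dict.get?]
  | cons q t ih =>
    simp only [List.map_cons]
    rw [PySem.Dict.get?_mk_cons, PySem.Dict.get?_mk_cons]
    by_cases h : (q.1 == x) = true
    · simp [h]
    · simp only [h]
      simpa using ih

theorem conn_nil (a b : Int) : Conn [] a b ↔ a = b := by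
  constructor
  · intro h
    exact ((Relation.reflTransGen_iff_eq (by intro c hc; simp [EAdj] at hc)).mp h).symm
  · rintro rfl; exact Relation.ReflTransGen.refl

theorem conn_mono (es : List (Int × Int)) (e : Int × Int) {a b : Int} (h : Conn es a b) :
    Conn (es ++ [e]) a b := by
  refine Relation.ReflTransGen.mono ?_ h
  intro x y hxy
  rcases hxy with h' | h'
  · exact Or.inl (List.mem_append_left _ h')
  · exact Or.inr (List.mem_append_left _ h')

theorem conn_snoc (es : List (Int × Int)) (u v a b : Int) :
    Conn (es ++ [(u, v)]) a b ↔
      Conn es a b ∨ (Conn es a u ∧ Conn es v b) ∨ (Conn es a v ∧ Conn es u b) := by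
  constructor
  · intro h
    induction h with
    | refl => exact Or.inl Relation.ReflTransGen.refl
    | @tail c b h1 h2 ih =>
      have hsplit : EAdj es c b ∨ (c = u ∧ b = v) ∨ (c = v ∧ b = u) := by
        rcases h2 with h' | h'
        · rcases List.mem_append.mp h' with hh | hh
          · exact Or.inl (Or.inl hh)
          · simp only [List.mem_singleton, Prod.mk.injEq] at hh
            exact Or.inr (Or.inl ⟨hh.1, hh.2⟩)
        · rcases List.mem_append.mp h' with hh | hh
          · exact Or.inl (Or.inr hh)
          · simp only [List.mem_singleton, Prod.mk.injEq] at hh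
            exact Or.inr (Or.inr ⟨hh.2, hh.1⟩)
      rcases hsplit with he | ⟨rfl, rfl⟩ | ⟨rfl, rfl⟩
      · rcases ih with h' | ⟨h1', h2'⟩ | ⟨h1', h2'⟩
        · exact Or.inl (h'.tail he)
        · exact Or.inr (Or.inl ⟨h1', h2'.tail he⟩)
        · exact Or.inr (Or.inr ⟨h1', h2'.tail he⟩)
      · rcases ih with h' | ⟨h1', h2'⟩ | ⟨h1', h2'⟩
        · exact Or.inr (Or.inl ⟨h', Relation.ReflTransGen.refl⟩)
        · exact Or.inr (Or.inl ⟨h1', Relation.ReflTransGen.refl⟩)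
        · exact Or.inl h1'
      · rcases ih with h' | ⟨h1', h2'⟩ | ⟨h1', h2'⟩
        · exact Or.inr (Or.inr ⟨h', Relation.ReflTransGen.refl⟩)
        · exact Or.inl h1'
        · exact Or.inr (Or.inr ⟨h1', Relation.ReflTransGen.refl⟩)
  · intro h
    have hedge : EAdj (es ++ [(u, v)]) u v := Or.inl (List.mem_append_right _ (List.mem_singleton.mpr rfl))
    have hedge' : EAdj (es ++ [(u, v)]) v u := Or.inr (List.mem_append_right _ (List.mem_singleton.mpr rfl))
    rcases h with h' | ⟨h1, h2⟩ | ⟨h1, h2⟩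
    · exact conn_mono es _ h'
    · exact (((conn_mono es _ h1).tail hedge)).trans (conn_mono es _ h2)
    · exact (((conn_mono es _ h1).tail hedge')).trans (conn_mono es _ h2)

theorem comp0_keys (vs : List Int) (hnd : vs.Nodup) : (comp0Of vs).keys = vs := by
  unfold comp0Of
  rw [PySem.Dict.keys_foldl_insert]
  have : (PySem.Dict.empty : PySem.Dict Int Int).keys = [] := by simp [PySem.Dict.keys_empty]
  rw [this, PySem.Set.update_nil_left, PySem.Set.ofList_eq_self_of_nodup _ hnd]

theorem comp0_getD (vs : List Int) (w : Int) (hw : w ∈ vs) : (comp0Of vs).getD w 0 = w := by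
  have aux2 : ∀ (l : List Int) (d : PySem.Dict Int Int) (w : Int), w ∉ l →
      (l.foldl (fun d w => d.insert w w) d).getD w 0 = d.getD w 0 := by
    intro l
    induction l with
    | nil => intro d w _; rfl
    | cons a t ih =>
      intro d w hw
      simp only [List.foldl_cons]
      rw [ih _ _ (fun h => hw (List.mem_cons_of_mem _ h))]
      rw [PySem.Dict.getD_insert, if_neg (fun h => hw (List.mem_cons.mpr (Or.inl h)))]
  have aux : ∀ (l : List Int) (d : PySem.Dict Int Int) (w : Int), w ∈ l →
      (l.foldl (fun d w => d.insert w w) d).getD w 0 = w := by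
    intro l
    induction l with
    | nil => intro d w hw; cases hw
    | cons a t ih =>
      intro d w hw
      simp only [List.foldl_cons]
      by_cases hwt : w ∈ t
      · exact ih _ _ hwt
      · have hwa : w = a := by
          rcases List.mem_cons.mp hw with h | h
          · exact h
          · exact absurd h hwt
        subst hwa
        rw [aux2 _ _ _ hwt, PySem.Dict.getD_insert, if_pos rfl]
  exact aux vs PySem.Dict.empty w hw

theorem getD_relabel (comp : PySem.Dict Int Int) (lu lv x : Int) (hx : x ∈ comp.keys) :
    (PySem.Dict.mk (comp.items.map (fun q => (q.1, if q.2 = lv then lu else q.2)))).getD x 0 =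
      (if comp.getD x 0 = lv then lu else comp.getD x 0) := by
  cases hgx : comp.get? x with
  | none => exact absurd hx ((PySem.Dict.get?_eq_none_iff_not_mem_keys comp x).mp hgx)
  | some la =>
    have hmk : (PySem.Dict.mk comp.items) = comp := rfl
    have h1 : (PySem.Dict.mk (comp.items.map (fun q => (q.1, if q.2 = lv then lu else q.2)))).get? x =
        (comp.get? x).map (fun t => if t = lv then lu else t) := by
      rw [← hmk]
      exact getD_mk_map (fun t => if t = lv then lu else t) comp.items x
    rw [PySem.Dict.getD_eq_get?_getD, h1, hgx, PySem.Dict.getD_eq_get?_getD, hgx]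
    rfl

theorem inv_fold (verts : List Int) :
    ∀ (rest done : List (Int × Int)) (comp : PySem.Dict Int Int),
    (∀ p ∈ rest, p.1 ∈ verts ∧ p.2 ∈ verts) →
    comp.keys = verts →
    (∀ a ∈ verts, ∀ b ∈ verts, (comp.getD a 0 = comp.getD b 0 ↔ Conn done a b)) →
    (rest.foldl relabelStep comp).keys = verts ∧
    (∀ a ∈ verts, ∀ b ∈ verts,
      ((rest.foldl relabelStep comp).getD a 0 = (rest.foldl relabelStep comp).getD b 0 ↔
        Conn (done ++ rest) a b)) := by
  intro rest
  induction rest with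
  | nil =>
    intro done comp _ hkeys hinv
    simpa using ⟨hkeys, hinv⟩
  | cons p t ih =>
    intro done comp hends hkeys hinv
    obtain ⟨hp1, hp2⟩ := hends p List.mem_cons_self
    have hsnoc : ∀ a b : Int, Conn (done ++ [p]) a b ↔
        Conn done a b ∨ (Conn done a p.1 ∧ Conn done p.2 b) ∨ (Conn done a p.2 ∧ Conn done p.1 b) := by
      intro a b
      have h := conn_snoc done p.1 p.2 a b
      rwa [Prod.mk.eta] at h
    have hedge : EAdj (done ++ [p]) p.1 p.2 := by
      left
      rw [Prod.mk.eta]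
      exact List.mem_append_right _ List.mem_cons_self
    have hedge' : EAdj (done ++ [p]) p.2 p.1 := by
      right
      rw [Prod.mk.eta]
      exact List.mem_append_right _ List.mem_cons_self
    have hstep : (relabelStep comp p).keys = verts ∧
        (∀ a ∈ verts, ∀ b ∈ verts,
          ((relabelStep comp p).getD a 0 = (relabelStep comp p).getD b 0 ↔ Conn (done ++ [p]) a b)) := by
      by_cases hlu : comp.getD p.1 0 = comp.getD p.2 0
      · have hrs : relabelStep comp p = comp := by simp [relabelStep, hlu]
        rw [hrs]
        refine ⟨hkeys, ?_⟩
        intro a ha b hb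
        rw [hinv a ha b hb, hsnoc a b]
        have hconnuv : Conn done p.1 p.2 := (hinv p.1 hp1 p.2 hp2).mp hlu
        constructor
        · exact fun h => Or.inl h
        · rintro (h | ⟨h1, h2⟩ | ⟨h1, h2⟩)
          · exact h
          · exact (h1.trans hconnuv).trans h2
          · exact (h1.trans (Conn_symm done hconnuv)).trans h2
      · have hrs : relabelStep comp p =
            PySem.Dict.mk (comp.items.map (fun q =>
              (q.1, if q.2 = comp.getD p.2 0 then comp.getD p.1 0 else q.2))) := by
          simp [relabelStep, hlu]
        have hkeys' : (relabelStep comp p).keys = verts := by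
          rw [hrs, ← hkeys]
          simp [PySem.Dict.keys, List.map_map]
        refine ⟨hkeys', ?_⟩
        intro a ha b hb
        have hga : (relabelStep comp p).getD a 0 =
            (if comp.getD a 0 = comp.getD p.2 0 then comp.getD p.1 0 else comp.getD a 0) := by
          rw [hrs]; exact getD_relabel comp _ _ a (by rw [hkeys]; exact ha)
        have hgb : (relabelStep comp p).getD b 0 =
            (if comp.getD b 0 = comp.getD p.2 0 then comp.getD p.1 0 else comp.getD b 0) := by
          rw [hrs]; exact getD_relabel comp _ _ b (by rw [hkeys]; exact hb)
        rw [hga, hgb, hsnoc a b]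
        by_cases hA : comp.getD a 0 = comp.getD p.2 0 <;> by_cases hB : comp.getD b 0 = comp.getD p.2 0
        · rw [if_pos hA, if_pos hB]
          have h1 : Conn done a p.2 := (hinv a ha p.2 hp2).mp hA
          have h2 : Conn done p.2 b := Conn_symm done ((hinv b hb p.2 hp2).mp hB)
          exact iff_of_true rfl (Or.inl (h1.trans h2))
        · rw [if_pos hA, if_neg hB]
          constructor
          · intro h
            have h2 : Conn done p.1 b := (hinv p.1 hp1 b hb).mp h
            exact Or.inr (Or.inr ⟨(hinv a ha p.2 hp2).mp hA, h2⟩)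
          · rintro (h | ⟨h1, h2⟩ | ⟨h1, h2⟩)
            · exact absurd (((hinv a ha b hb).mpr h).symm.trans hA) hB
            · exact absurd ((hinv b hb p.2 hp2).mpr (Conn_symm done h2)) hB
            · exact (hinv p.1 hp1 b hb).mpr h2
        · rw [if_neg hA, if_pos hB]
          constructor
          · intro h
            have h1 : Conn done a p.1 := (hinv a ha p.1 hp1).mp h
            have h2 : Conn done p.2 b := Conn_symm done ((hinv b hb p.2 hp2).mp hB)
            exact Or.inr (Or.inl ⟨h1, h2⟩)
          · rintro (h | ⟨h1, h2⟩ | ⟨h1, h2⟩)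
            · exact absurd (((hinv a ha b hb).mpr h).trans hB) hA
            · exact (hinv a ha p.1 hp1).mpr h1
            · exact absurd ((hinv a ha p.2 hp2).mpr h1) hA
        · rw [if_neg hA, if_neg hB]
          rw [hinv a ha b hb]
          constructor
          · exact fun h => Or.inl h
          · rintro (h | ⟨h1, h2⟩ | ⟨h1, h2⟩)
            · exact h
            · exact absurd ((hinv b hb p.2 hp2).mpr (Conn_symm done h2)) hB
            · exact absurd ((hinv a ha p.2 hp2).mpr h1) hA
    simp only [List.foldl_cons]
    have := ih (done ++ [p]) (relabelStep comp p)
      (fun q hq => hends q (List.mem_cons_of_mem _ hq)) hstep.1 hstep.2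
    rwa [List.append_assoc, List.singleton_append] at this

theorem setLen_one (l : List Int) :
    (PySem.Set.ofList l).length = 1 ↔ l ≠ [] ∧ ∃ c, ∀ x ∈ l, x = c := by
  constructor
  · intro h
    obtain ⟨c, hc⟩ := List.length_eq_one_iff.mp h
    refine ⟨?_, c, ?_⟩
    · intro hl
      subst hl
      simp [PySem.Set.ofList] at hc
    · intro x hx
      have := (PySem.Set.mem_ofList l x).mpr hx
      rw [hc] at this
      exact List.mem_singleton.mp this
  · rintro ⟨hne, c, hall⟩
    obtain ⟨x, hx⟩ := List.exists_mem_of_ne_nil l hne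
    have hcx : x = c := hall x hx
    have hc : c ∈ PySem.Set.ofList l := (PySem.Set.mem_ofList l c).mpr (hcx ▸ hx)
    have hnd := PySem.Set.nodup_ofList l
    cases hh : PySem.Set.ofList l with
    | nil => rw [hh] at hc; cases hc
    | cons a t =>
      cases t with
      | nil => rfl
      | cons b t2 =>
        exfalso
        rw [hh] at hnd
        have ha : a = c := hall a ((PySem.Set.mem_ofList l a).mp (hh ▸ List.mem_cons_self))
        have hb : b = c := hall b ((PySem.Set.mem_ofList l b).mp (hh ▸ (List.mem_cons_of_mem _ List.mem_cons_self)))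
        rw [List.nodup_cons] at hnd
        exact hnd.1 (by rw [ha, hb]; exact List.mem_cons_self)

-- B's connectivity verdict, characterised
theorem condB_iff (es : List (Int × Int)) (hne : vertsOf es ≠ []) :
    (PySem.Set.ofList ((vertsOf es).foldl (fun d w => d.insert w w) PySem.Dict.empty
        |> es.foldl relabelStep).values).length = 1 ↔
    ∀ w ∈ vertsOf es, Conn es ((vertsOf es).headD 0) w := by
  have hnd := nodup_vertsOf es
  have hends : ∀ p ∈ es, p.1 ∈ vertsOf es ∧ p.2 ∈ vertsOf es := fun p hp =>
    ⟨(mem_vertsOf es p.1).mpr ⟨p, hp, Or.inl rfl⟩, (mem_vertsOf es p.2).mpr ⟨p, hp, Or.inr rfl⟩⟩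
  have hbase_inv : ∀ a ∈ vertsOf es, ∀ b ∈ vertsOf es,
      ((comp0Of (vertsOf es)).getD a 0 = (comp0Of (vertsOf es)).getD b 0 ↔ Conn [] a b) := by
    intro a ha b hb
    rw [comp0_getD _ _ ha, comp0_getD _ _ hb, conn_nil]
  obtain ⟨hK, hI⟩ := inv_fold (vertsOf es) es [] (comp0Of (vertsOf es)) hends (comp0_keys _ hnd) hbase_inv
  rw [List.nil_append] at hI
  show (PySem.Set.ofList (es.foldl relabelStep (comp0Of (vertsOf es))).values).length = 1 ↔ _
  have hknd : (es.foldl relabelStep (comp0Of (vertsOf es))).keys.Nodup := by rw [hK]; exact hnd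
  rw [PySem.Dict.values_eq_map_keys _ hknd 0, hK, setLen_one]
  constructor
  · rintro ⟨_, c, hc⟩
    intro w hw
    have h1 := hc _ (List.mem_map.mpr ⟨w, hw, rfl⟩)
    have h0 := hc _ (List.mem_map.mpr ⟨_, headD_mem _ hne, rfl⟩)
    exact Conn_symm es ((hI w hw _ (headD_mem _ hne)).mp (h1.trans h0.symm))
  · intro h
    refine ⟨fun hm => hne (List.map_eq_nil_iff.mp hm),
      (es.foldl relabelStep (comp0Of (vertsOf es))).getD ((vertsOf es).headD 0) 0, ?_⟩
    intro x hx
    obtain ⟨w, hw, rfl⟩ := List.mem_map.mp hx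
    exact (hI w hw _ (headD_mem _ hne)).mpr (Conn_symm es (h w hw))

-- the classification tail: if-chain = table lookup
theorem tail_eq (ds : List Int) (r : String) :
    (if ds = [1, 1, 1, 2, 3] then some "fork"
     else if ds = [1, 1, 1, 1, 4] then some "K_{1,4}"
     else if ds = [1, 1, 2, 2, 2] then some "P_5"
     else some ("tree_" ++ r)) =
    some ((PySem.Dict.ofList
        [([1, 1, 1, 2, 3], "fork"), ([1, 1, 1, 1, 4], "K_{1,4}"), ([1, 1, 2, 2, 2], "P_5")]
        : PySem.Dict (List Int) String).getD ds ("tree_" ++ r)) := by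
  have htab : (PySem.Dict.ofList
      [([1, 1, 1, 2, 3], "fork"), ([1, 1, 1, 1, 4], "K_{1,4}"), ([1, 1, 2, 2, 2], "P_5")]
      : PySem.Dict (List Int) String) = PySem.Dict.mk
      [([1, 1, 1, 2, 3], "fork"), ([1, 1, 1, 1, 4], "K_{1,4}"), ([1, 1, 2, 2, 2], "P_5")] := rfl
  rw [htab, PySem.Dict.getD_eq_get?_getD]
  clear htab
  by_cases h1 : ds = [1, 1, 1, 2, 3]
  · subst h1; rfl
  · rw [if_neg h1]
    by_cases h2 : ds = [1, 1, 1, 1, 4]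
    · subst h2; rfl
    · rw [if_neg h2]
      by_cases h3 : ds = [1, 1, 2, 2, 2]
      · subst h3; rfl
      · rw [if_neg h3]
        have e1 : (([1, 1, 1, 2, 3] : List Int) == ds) = false := by
          cases h : ([1, 1, 1, 2, 3] : List Int) == ds
          · rfl
          · exact absurd (eq_of_beq h).symm h1
        have e2 : (([1, 1, 1, 1, 4] : List Int) == ds) = false := by
          cases h : ([1, 1, 1, 1, 4] : List Int) == ds
          · rfl
          · exact absurd (eq_of_beq h).symm h2
        have e3 : (([1, 1, 2, 2, 2] : List Int) == ds) = false := by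
          cases h : ([1, 1, 2, 2, 2] : List Int) == ds
          · rfl
          · exact absurd (eq_of_beq h).symm h3
        simp [e1, e2, e3, PySem.Dict.get?]

theorem classify_eq (es : List (Int × Int)) : classifyA es = classifyB es := by
  show (if (es.length : Int) ≠ ((vertsOf es).length : Int) - 1 then none
      else if ¬ (PySem.Set.equal
          (dfsA (adjOf es) (1 + (vertsOf es).length * ((vertsOf es).length + 1))
            [(vertsOf es).headD 0] PySem.Set.empty) (vertsOf es) = true) then none
      else if degSeq es = [1, 1, 1, 2, 3] then some "fork"
      else if degSeq es = [1, 1, 1, 1, 4] then some "K_{1,4}"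
      else if degSeq es = [1, 1, 2, 2, 2] then some "P_5"
      else some ("tree_" ++ pyTupleRepr (degSeq es))) =
    (if (es.length : Int) ≠ ((vertsOf es).length : Int) - 1 then none
      else if (PySem.Set.ofList ((vertsOf es).foldl (fun d w => d.insert w w) PySem.Dict.empty
          |> es.foldl relabelStep).values).length ≠ 1 then none
      else some ((PySem.Dict.ofList
          [([1, 1, 1, 2, 3], "fork"), ([1, 1, 1, 1, 4], "K_{1,4}"), ([1, 1, 2, 2, 2], "P_5")]
          : PySem.Dict (List Int) String).getD (degSeq es) ("tree_" ++ pyTupleRepr (degSeq es))))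
  by_cases hg : (es.length : Int) ≠ ((vertsOf es).length : Int) - 1
  · rw [if_pos hg, if_pos hg]
  · rw [if_neg hg, if_neg hg]
    have heq : (es.length : Int) = ((vertsOf es).length : Int) - 1 := not_ne_iff.mp hg
    have hne : vertsOf es ≠ [] := by
      intro h
      rw [h] at heq
      simp at heq
    have hAB : (¬ (PySem.Set.equal
        (dfsA (adjOf es) (1 + (vertsOf es).length * ((vertsOf es).length + 1))
          [(vertsOf es).headD 0] PySem.Set.empty) (vertsOf es) = true)) ↔
        ((PySem.Set.ofList ((vertsOf es).foldl (fun d w => d.insert w w) PySem.Dict.empty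
          |> es.foldl relabelStep).values).length ≠ 1) := by
      rw [not_iff_not]
      exact (condA_iff es hne).trans (condB_iff es hne).symm
    by_cases hca : (¬ (PySem.Set.equal
        (dfsA (adjOf es) (1 + (vertsOf es).length * ((vertsOf es).length + 1))
          [(vertsOf es).headD 0] PySem.Set.empty) (vertsOf es) = true))
    · rw [if_pos hca, if_pos (hAB.mp hca)]
    · rw [if_neg hca, if_neg (fun h => hca (hAB.mpr h))]
      exact tail_eq (degSeq es) (pyTupleRepr (degSeq es))

-- ===== VERDICT (by name: the statement is the Claim_ definition above) =====
theorem classify_tree_spec : Claim_equal_classify_tree := by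
  intro bs e1 _ _
  unfold Spec_classify_tree classify_tree classify_tree_alt
  exact classify_eq _
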